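-- pv_equiv track=rewrite | github.com/fpddmw/https---github.com-fpddmw-eco-concil-runtime | eco-concil-runtime/src/eco_council_runtime/kernel/progress_dashboard.py | collect_table_lines
-- ===== SOURCE A (Python) =====
-- def collect_table_lines(lines: list[str], start_index: int) -> list[str]:
--     table_lines: list[str] = []
--     started = False
--     for line in lines[start_index:]:
--         if line.strip().startswith("|"):
--             table_lines.append(line)
--             started = True
--             continue
--         if started:
--             break
--     return table_lines
-- ===== SOURCE B (Python) =====
-- def collect_table_lines(lines: list[str], start_index: int) -> list[str]:
--     def is_table(line: str) -> bool:
--         return line.strip().startswith("|")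
--     tail = lines[start_index:]
--     i = 0
--     while i < len(tail) and not is_table(tail[i]):
--         i += 1
--     j = i
--     while j < len(tail) and is_table(tail[j]):
--         j += 1
--     return tail[i:j]
-- ===== Notes on version B (the rewrite author's own statement) =====
-- stated objective: alternative
-- what changed: Replaces the flag-driven single loop (started boolean with break) by two explicit index-scan phases over the slice: advance past leading non-table lines, then advance through the contiguous table run, returning that sub-slice.
import Mathlib
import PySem

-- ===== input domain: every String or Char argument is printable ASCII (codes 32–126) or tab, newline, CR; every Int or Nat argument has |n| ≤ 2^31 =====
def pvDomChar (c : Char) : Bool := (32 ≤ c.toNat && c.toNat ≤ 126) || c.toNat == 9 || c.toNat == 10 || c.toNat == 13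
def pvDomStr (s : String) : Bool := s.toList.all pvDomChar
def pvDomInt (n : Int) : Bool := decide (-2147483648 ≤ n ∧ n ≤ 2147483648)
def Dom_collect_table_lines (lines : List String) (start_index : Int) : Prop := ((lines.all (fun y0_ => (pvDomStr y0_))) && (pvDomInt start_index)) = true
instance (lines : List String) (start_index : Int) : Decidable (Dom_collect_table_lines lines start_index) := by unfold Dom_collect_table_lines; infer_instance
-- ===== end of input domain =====

-- B changes the decomposition (two index-scan phases instead of a flag-driven loop with break); same cost, no behaviour change.

-- ===== PORT A =====
-- line.strip().startswith("|")
def pvIsTable (line : String) : Bool := PySem.Str.startswith (PySem.Str.strip line) "|"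

-- the for-loop of A: state (table_lines, started), 'break' = return accumulator
def pvLoopA : List String → List String → Bool → List String
  | [], acc, _ => acc
  | l :: rest, acc, started =>
    if pvIsTable l then pvLoopA rest (acc ++ [l]) true
    else if started then acc else pvLoopA rest acc started

def collect_table_lines (lines : List String) (start_index : Int) : List String :=
  pvLoopA (PySem.List.slice lines (some start_index) none) [] false

-- ===== PORT B =====
-- while i < len(tail) and cond(tail[i]): i += 1
def pvScan (tail : List String) (cond : String → Bool) (i : Nat) : Nat :=
  if h : i < tail.length then
    if cond tail[i] then pvScan tail cond (i + 1) else i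
  else i
termination_by tail.length - i

def collect_table_lines_alt (lines : List String) (start_index : Int) : List String :=
  let tail := PySem.List.slice lines (some start_index) none
  let i := pvScan tail (fun l => !pvIsTable l) 0
  let j := pvScan tail pvIsTable i
  PySem.List.slice tail (some (i : Int)) (some (j : Int))

-- ===== PRECONDITION & SPEC =====
def Spec_collect_table_lines (lines : List String) (start_index : Int) (out : List String) : Prop := out = collect_table_lines_alt lines start_index
instance (lines : List String) (start_index : Int) (out : List String) : Decidable (Spec_collect_table_lines lines start_index out) := by unfold Spec_collect_table_lines; infer_instance

-- ===== CLAIM (what is proved, stated in full; the proofs are below) =====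
def Claim_equal_collect_table_lines : Prop := ∀ (lines : List String) (start_index : Int), Dom_collect_table_lines lines start_index → Spec_collect_table_lines lines start_index (collect_table_lines lines start_index)

-- ===== LEMMAS AND PROOFS =====

theorem pvScan_eq (tail : List String) (cond : String → Bool) (i : Nat) (hi : i ≤ tail.length) :
    pvScan tail cond i = i + ((tail.drop i).takeWhile cond).length := by
  rw [pvScan]
  by_cases h : i < tail.length
  · have hdrop : tail.drop i = tail[i] :: tail.drop (i + 1) := List.drop_eq_getElem_cons h
    by_cases hc : cond tail[i]
    · simp only [h, hc, dif_pos, if_pos]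
      rw [pvScan_eq tail cond (i + 1) h, hdrop, List.takeWhile_cons, hc]
      simp; omega
    · simp only [h, hc, dif_pos, if_neg, Bool.not_eq_true]
      rw [hdrop, List.takeWhile_cons]
      simp [hc]
  · have : i = tail.length := le_antisymm hi (not_lt.mp h)
    simp [this]
termination_by tail.length - i

theorem pvLoopA_true : ∀ (xs acc : List String), pvLoopA xs acc true = acc ++ xs.takeWhile pvIsTable := by
  intro xs
  induction xs with
  | nil => intro acc; simp [pvLoopA]
  | cons l rest ih =>
    intro acc
    by_cases hl : pvIsTable l
    · simp [pvLoopA, hl, ih]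
    · simp [pvLoopA, hl]

theorem pvLoopA_false : ∀ (xs acc : List String),
    pvLoopA xs acc false = acc ++ ((xs.dropWhile (fun l => !pvIsTable l)).takeWhile pvIsTable) := by
  intro xs
  induction xs with
  | nil => intro acc; simp [pvLoopA]
  | cons l rest ih =>
    intro acc
    by_cases hl : pvIsTable l
    · simp [pvLoopA, hl, pvLoopA_true]
    · simp [pvLoopA, hl, ih]

theorem collect_table_lines_eq (lines : List String) (start_index : Int) :
    collect_table_lines lines start_index = collect_table_lines_alt lines start_index := by
  unfold collect_table_lines collect_table_lines_alt
  set tail := PySem.List.slice lines (some start_index) none with htail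
  set p := pvIsTable with hp
  set c : String → Bool := fun l => !pvIsTable l with hc
  have hi0 : pvScan tail c 0 = (tail.takeWhile c).length := by
    rw [pvScan_eq tail c 0 (Nat.zero_le _)]; simp
  have hdrop : tail.drop (tail.takeWhile c).length = tail.dropWhile c := by
    calc tail.drop (tail.takeWhile c).length
        = (tail.takeWhile c ++ tail.dropWhile c).drop (tail.takeWhile c).length := by
          rw [List.takeWhile_append_dropWhile]
      _ = tail.dropWhile c := List.drop_left ..
  have hile : (tail.takeWhile c).length ≤ tail.length := (List.takeWhile_prefix c).length_le
  have hj0 : pvScan tail p (pvScan tail c 0)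
      = (tail.takeWhile c).length + ((tail.dropWhile c).takeWhile p).length := by
    rw [hi0, pvScan_eq tail p _ hile, hdrop]
  show pvLoopA tail [] false
      = PySem.List.slice tail (some ((pvScan tail c 0 : Nat) : Int))
          (some ((pvScan tail p (pvScan tail c 0) : Nat) : Int))
  rw [pvLoopA_false, hj0, hi0, PySem.List.slice_natCast, hdrop,
    Nat.add_sub_cancel_left, List.nil_append]
  exact List.prefix_iff_eq_take.mp (List.takeWhile_prefix p)

-- ===== VERDICT (by name: the statement is the Claim_ definition above) =====
theorem collect_table_lines_spec : Claim_equal_collect_table_lines := by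
  intro lines start_index _
  exact collect_table_lines_eq lines start_index
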